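-- pv_equiv track=rewrite | github.com/iero1997/audit-engine-s3-and-lambdas-dev | utilities/utils.py | convert_sizes_to_idx_ranges
-- ===== SOURCE A (Python) =====
-- def convert_sizes_to_idx_ranges(sizes_list):
--     """
--         given sizes list, convert to list of tuples of ranges,
--         (start,end) where end is one past the last item included.
--     """
--
--     ranges_list = []
--
--     os = 0
--     for size in sizes_list:
--         range = (os, os+size)
--         os += size
--         ranges_list.append(range)
--
--     return ranges_list
-- ===== SOURCE B (Python) =====
-- def convert_sizes_to_idx_ranges(sizes_list):
--     """Divide and conquer: compute ranges for each half independently,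
--     then shift the right half's ranges by the left half's total size."""
--     if len(sizes_list) <= 1:
--         return [(0, s) for s in sizes_list]
--     mid = len(sizes_list) // 2
--     offset = sum(sizes_list[:mid])
--     left = convert_sizes_to_idx_ranges(sizes_list[:mid])
--     right = convert_sizes_to_idx_ranges(sizes_list[mid:])
--     return left + [(s + offset, e + offset) for (s, e) in right]
-- ===== Notes on version B (the rewrite author's own statement) =====
-- stated objective: alternative
-- what changed: Replaces the single running-accumulator loop with a divide-and-conquer: split the list at the midpoint, recursively convert each half, and shift the right half's ranges by the sum of the left half.
import Mathlib
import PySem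

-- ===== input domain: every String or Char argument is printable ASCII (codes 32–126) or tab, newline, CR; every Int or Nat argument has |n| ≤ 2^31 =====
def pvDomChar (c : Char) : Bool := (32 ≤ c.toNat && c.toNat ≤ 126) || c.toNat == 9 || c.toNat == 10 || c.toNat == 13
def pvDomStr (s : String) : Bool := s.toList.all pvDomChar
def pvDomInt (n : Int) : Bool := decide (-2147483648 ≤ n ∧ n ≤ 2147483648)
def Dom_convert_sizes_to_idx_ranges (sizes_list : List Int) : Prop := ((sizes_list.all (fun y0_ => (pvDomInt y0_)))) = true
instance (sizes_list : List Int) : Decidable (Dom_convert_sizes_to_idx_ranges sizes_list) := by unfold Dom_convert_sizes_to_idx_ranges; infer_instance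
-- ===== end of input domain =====

-- B replaces A's running-accumulator loop with a divide-and-conquer split at the midpoint (alternative decomposition; A is O(n), B is O(n log n)).

-- ===== PORT A =====
-- A: one loop carrying (ranges_list, os); each step appends (os, os+size) and advances os.
def convert_sizes_to_idx_ranges (sizes_list : List Int) : List (Int × Int) :=
  (sizes_list.foldl
    (fun (st : List (Int × Int) × Int) size =>
      (st.1 ++ [(st.2, st.2 + size)], st.2 + size))
    ([], 0)).1

-- ===== PORT B =====
-- B: split at the midpoint, recurse on each half, shift the right half by the left sum.
def convert_sizes_to_idx_ranges_alt (sizes_list : List Int) : List (Int × Int) :=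
  if sizes_list.length ≤ 1 then
    sizes_list.map (fun s => ((0 : Int), s))
  else
    let mid := sizes_list.length / 2
    let offset := (sizes_list.take mid).foldl (· + ·) 0
    let left := convert_sizes_to_idx_ranges_alt (sizes_list.take mid)
    let right := convert_sizes_to_idx_ranges_alt (sizes_list.drop mid)
    left ++ right.map (fun p => (p.1 + offset, p.2 + offset))
termination_by sizes_list.length
decreasing_by
  · simp only [List.length_take]; omega
  · simp only [List.length_drop]; omega

-- ===== PRECONDITION & SPEC =====
def Spec_convert_sizes_to_idx_ranges (sizes_list : List Int) (out : List (Int × Int)) : Prop := out = convert_sizes_to_idx_ranges_alt sizes_list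
instance (sizes_list : List Int) (out : List (Int × Int)) : Decidable (Spec_convert_sizes_to_idx_ranges sizes_list out) := by unfold Spec_convert_sizes_to_idx_ranges; infer_instance

-- ===== CLAIM (what is proved, stated in full; the proofs are below) =====
def Claim_equal_convert_sizes_to_idx_ranges : Prop := ∀ (sizes_list : List Int), Dom_convert_sizes_to_idx_ranges sizes_list → Spec_convert_sizes_to_idx_ranges sizes_list (convert_sizes_to_idx_ranges sizes_list)

-- ===== LEMMAS AND PROOFS =====

-- reference shape of the result, used only by the proofs
def pvRanges (os : Int) : List Int → List (Int × Int)
  | [] => []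
  | s :: t => (os, os + s) :: pvRanges (os + s) t

theorem foldA_eq (l : List Int) : ∀ (acc : List (Int × Int)) (os : Int),
    (l.foldl (fun (st : List (Int × Int) × Int) size =>
      (st.1 ++ [(st.2, st.2 + size)], st.2 + size)) (acc, os)).1
      = acc ++ pvRanges os l := by
  induction l with
  | nil => intro acc os; simp [pvRanges]
  | cons s t ih =>
      intro acc os
      simp only [List.foldl_cons, pvRanges]
      rw [ih]
      simp

theorem foldl_add_shift (l : List Int) : ∀ (a : Int),
    l.foldl (· + ·) a = a + l.foldl (· + ·) 0 := by
  induction l with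
  | nil => intro a; simp
  | cons s t ih =>
      intro a
      simp only [List.foldl_cons]
      rw [ih (a + s), ih (0 + s)]
      ring

theorem pvRanges_shift (l : List Int) : ∀ (a b : Int),
    pvRanges (a + b) l = (pvRanges b l).map (fun p => (p.1 + a, p.2 + a)) := by
  induction l with
  | nil => intro a b; simp [pvRanges]
  | cons s t ih =>
      intro a b
      simp only [pvRanges, List.map_cons]
      have h1 : a + b + s = a + (b + s) := by ring
      rw [h1, ih a (b + s)]
      have h2 : a + b = b + a := by ring
      have h3 : a + (b + s) = b + s + a := by ring
      rw [h2, h3]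

theorem pvRanges_append (l1 l2 : List Int) : ∀ (b : Int),
    pvRanges b (l1 ++ l2) = pvRanges b l1 ++ pvRanges (b + l1.foldl (· + ·) 0) l2 := by
  induction l1 with
  | nil => intro b; simp [pvRanges]
  | cons s t ih =>
      intro b
      simp only [List.cons_append, pvRanges, List.foldl_cons]
      rw [ih (b + s), foldl_add_shift t (0 + s)]
      have : b + s + t.foldl (· + ·) 0 = b + (0 + s + t.foldl (· + ·) 0) := by ring
      rw [this]

theorem altB_eq (n : ℕ) : ∀ (l : List Int), l.length = n →
    convert_sizes_to_idx_ranges_alt l = pvRanges 0 l := by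
  induction n using Nat.strong_induction_on with
  | _ n ih =>
      intro l hl
      rw [convert_sizes_to_idx_ranges_alt]
      by_cases h : l.length ≤ 1
      · simp only [h, if_true]
        match l, h with
        | [], _ => simp [pvRanges]
        | [s], _ => simp [pvRanges]
      · simp only [h, if_false]
        have h2 : 2 ≤ l.length := by omega
        have htake : (l.take (l.length / 2)).length = l.length / 2 := by
          simp [List.length_take]; omega
        have hdrop : (l.drop (l.length / 2)).length = l.length - l.length / 2 := by
          simp [List.length_drop]
        rw [ih _ (by omega) _ htake, ih _ (by omega) _ hdrop]
        have hsplit : l = l.take (l.length / 2) ++ l.drop (l.length / 2) :=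
          (List.take_append_drop _ l).symm
        calc pvRanges 0 (l.take (l.length / 2)) ++
              (pvRanges 0 (l.drop (l.length / 2))).map
                (fun p => (p.1 + (l.take (l.length / 2)).foldl (· + ·) 0,
                           p.2 + (l.take (l.length / 2)).foldl (· + ·) 0))
            = pvRanges 0 (l.take (l.length / 2)) ++
              pvRanges ((l.take (l.length / 2)).foldl (· + ·) 0 + 0)
                (l.drop (l.length / 2)) := by
              rw [pvRanges_shift]
          _ = pvRanges 0 l := by
              conv_rhs => rw [hsplit]
              rw [pvRanges_append]
              norm_num

-- ===== VERDICT (by name: the statement is the Claim_ definition above) =====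
theorem convert_sizes_to_idx_ranges_spec : Claim_equal_convert_sizes_to_idx_ranges := by
  intro l _
  show convert_sizes_to_idx_ranges l = convert_sizes_to_idx_ranges_alt l
  rw [altB_eq l.length l rfl]
  unfold convert_sizes_to_idx_ranges
  rw [foldA_eq]
  simp
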